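-- pv_equiv track=rewrite | github.com/maxippacheco/aed2024 | gtp3/ej3.py | are_inverse
-- ===== SOURCE A (Python) =====
-- def are_inverse(M1, M2):
-- 	if len(M1) != len(M2):
-- 		return False
--
-- 	for key, value in M1.items():
-- 		if M2.get(value) != key:
-- 			return False
--
-- 	for key, value in M2.items():
-- 		if M1.get(value) != key:
-- 			return False
--
-- 	return True
-- ===== SOURCE B (Python) =====
-- def are_inverse(M1, M2):
--     if len(M1) != len(M2):
--         return False
--     inv = {v: k for k, v in M1.items()}
--     return inv == M2
-- ===== Notes on version B (the rewrite author's own statement) =====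
-- stated objective: simpler
-- what changed: B builds the inverse of M1 once as a dict comprehension and returns len(M1) == len(M2) and inv == M2, replacing A's two per-item membership-check scans over both dicts with one build plus one dict comparison.
import Mathlib
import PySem

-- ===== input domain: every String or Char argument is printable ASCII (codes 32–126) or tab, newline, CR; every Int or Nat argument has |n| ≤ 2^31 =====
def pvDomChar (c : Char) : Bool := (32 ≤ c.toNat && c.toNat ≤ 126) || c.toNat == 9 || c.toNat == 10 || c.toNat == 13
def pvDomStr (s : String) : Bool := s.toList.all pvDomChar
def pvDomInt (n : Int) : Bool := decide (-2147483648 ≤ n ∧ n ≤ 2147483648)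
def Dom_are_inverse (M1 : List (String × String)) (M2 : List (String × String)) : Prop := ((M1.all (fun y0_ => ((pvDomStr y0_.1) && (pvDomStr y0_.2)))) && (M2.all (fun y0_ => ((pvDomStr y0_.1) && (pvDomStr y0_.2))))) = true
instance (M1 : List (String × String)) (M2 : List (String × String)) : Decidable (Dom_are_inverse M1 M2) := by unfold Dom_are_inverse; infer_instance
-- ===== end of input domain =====

-- B replaces A's two membership-check scans by building M1's inverse dict once and
-- comparing it to M2 in one shot (objective: simpler — one pass + one dict comparison).

-- ===== PORT A =====
-- A receives dicts; the association lists are the dicts' item lists (duplicate keys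
-- collapse exactly as Python's dict(...) does, via PySem.Dict.ofList).
def are_inverse (M1 : List (String × String)) (M2 : List (String × String)) : Bool :=
  let d1 := PySem.Dict.ofList M1
  let d2 := PySem.Dict.ofList M2
  if d1.size ≠ d2.size then false
  else if ¬ (d1.items.all (fun kv => d2.get? kv.2 == some kv.1)) then false
  else if ¬ (d2.items.all (fun kv => d1.get? kv.2 == some kv.1)) then false
  else true

-- ===== PORT B =====
-- Python's dict ==: same size and every item of the left dict looked up in the right.
def pyDictEq (dA dB : PySem.Dict String String) : Bool :=
  dA.size == dB.size && dA.items.all (fun kv => dB.get? kv.1 == some kv.2)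

def are_inverse_alt (M1 : List (String × String)) (M2 : List (String × String)) : Bool :=
  let d1 := PySem.Dict.ofList M1
  let d2 := PySem.Dict.ofList M2
  if d1.size ≠ d2.size then false
  else
    let inv := d1.items.foldl (fun d kv => d.insert kv.2 kv.1) PySem.Dict.empty
    pyDictEq inv d2

-- ===== PRECONDITION & SPEC =====
def Spec_are_inverse (M1 : List (String × String)) (M2 : List (String × String)) (out : Bool) : Prop := out = are_inverse_alt M1 M2
instance (M1 : List (String × String)) (M2 : List (String × String)) (out : Bool) : Decidable (Spec_are_inverse M1 M2 out) := by unfold Spec_are_inverse; infer_instance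

-- ===== CLAIM (what is proved, stated in full; the proofs are below) =====
def Claim_equal_are_inverse : Prop := ∀ (M1 : List (String × String)) (M2 : List (String × String)), Dom_are_inverse M1 M2 → Spec_are_inverse M1 M2 (are_inverse M1 M2)

-- ===== LEMMAS AND PROOFS =====

-- A list whose ordered deduplication keeps its full length has no duplicates.
theorem nodup_of_ofList_length {α : Type} [DecidableEq α]
    (l : List α) (h : (PySem.Set.ofList l).length = l.length) : l.Nodup := by
  have hperm : (PySem.Set.ofList l).Perm l.dedup := by
    refine (List.perm_ext_iff_of_nodup (PySem.Set.nodup_ofList l) l.nodup_dedup).2 ?_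
    intro x
    rw [PySem.Set.mem_ofList, List.mem_dedup]
  have hlen : l.dedup.length = l.length := by
    rw [← hperm.length_eq, h]
  have : l.dedup = l := (List.dedup_sublist l).eq_of_length hlen
  rw [← this]; exact l.nodup_dedup

-- Core equivalence, over arbitrary dicts with (automatically) nodup keys.
theorem core_eq (d1 d2 : PySem.Dict String String)
    (h1 : d1.keys.Nodup) (hsz : d1.size = d2.size) :
    (d1.items.all (fun kv => d2.get? kv.2 == some kv.1)
      && d2.items.all (fun kv => d1.get? kv.2 == some kv.1))
    = pyDictEq (d1.items.foldl (fun d kv => d.insert kv.2 kv.1) PySem.Dict.empty) d2 := by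
  set L := d1.items with hL
  set inv := L.foldl (fun d kv => d.insert kv.2 kv.1) PySem.Dict.empty with hinvdef
  have hLnd : L.Nodup := h1.of_map Prod.fst
  have hsz1 : d1.size = L.length := rfl
  have hsz2 : d2.size = d2.items.length := rfl
  -- keys of inv are the distinct values of d1
  have hkeys : inv.keys = PySem.Set.ofList (L.map Prod.snd) := by
    rw [hinvdef, PySem.Dict.keys_foldl_insert_key L Prod.snd (fun d kv => kv.1) PySem.Dict.empty,
      PySem.Dict.keys_empty, PySem.Set.update_nil_left]
  have hinvsz : inv.size = inv.keys.length := (inv.items.length_map Prod.fst).symm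
  -- the common bridge once values are known distinct
  have hitems : (L.map Prod.snd).Nodup →
      inv.items = L.map (fun kv => (kv.2, kv.1)) := by
    intro hv
    rw [hinvdef]
    exact PySem.Dict.items_foldl_insert_fresh L (fun kv => kv.2) (fun kv => kv.1)
      PySem.Dict.empty (fun a _ => PySem.Dict.contains_empty _) hv
  rw [Bool.eq_iff_iff]
  simp only [Bool.and_eq_true, List.all_eq_true, beq_iff_eq, pyDictEq, beq_iff_eq]
  constructor
  · rintro ⟨hC1, hC2⟩
    have hv : (L.map Prod.snd).Nodup := by
      refine hLnd.map_on ?_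
      intro x hx y hy hxy
      have e1 := hC1 x hx
      have e2 := hC1 y hy
      rw [hxy] at e1
      exact Prod.ext (Option.some.inj (e1.symm.trans e2)) hxy
    have hit := hitems hv
    refine ⟨?_, ?_⟩
    · rw [hinvsz, hkeys]
      have : (PySem.Set.ofList (L.map Prod.snd)).length = (L.map Prod.snd).length := by
        have := (List.perm_ext_iff_of_nodup (PySem.Set.nodup_ofList _) hv).2
          (fun x => PySem.Set.mem_ofList _ x)
        exact this.length_eq
      rw [this, List.length_map, ← hsz1, hsz]
    · intro kv hkv
      rw [hit] at hkv
      obtain ⟨x, hx, rfl⟩ := List.mem_map.1 hkv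
      exact hC1 x hx
  · rintro ⟨hE1, hE2⟩
    have hv : (L.map Prod.snd).Nodup := by
      apply nodup_of_ofList_length
      rw [← hkeys, ← hinvsz, hE1, List.length_map, ← hsz1, hsz]
    have hit := hitems hv
    have hC1 : ∀ kv ∈ L, d2.get? kv.2 = some kv.1 := by
      intro kv hkv
      exact hE2 (kv.2, kv.1) (by rw [hit]; exact List.mem_map.2 ⟨kv, hkv, rfl⟩)
    refine ⟨hC1, ?_⟩
    have hnd : (L.map (fun kv => (kv.2, kv.1))).Nodup := by
      have : ((L.map (fun kv : String × String => (kv.2, kv.1))).map Prod.fst).Nodup := by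
        rw [List.map_map]; exact hv
      exact this.of_map Prod.fst
    have hsub : (L.map (fun kv => (kv.2, kv.1))) ⊆ d2.items := by
      intro x hxm
      have hg : d2.get? x.1 = some x.2 := hE2 x (by rw [hit]; exact hxm)
      have := PySem.Dict.mem_items_of_get?_eq_some (d := d2) hg
      simpa using this
    have hperm : (L.map (fun kv => (kv.2, kv.1))).Perm d2.items := by
      refine (List.subperm_of_subset hnd hsub).perm_of_length_le ?_
      rw [List.length_map, ← hsz1, hsz, ← hsz2]
    intro kv hkv
    have : kv ∈ L.map (fun kv : String × String => (kv.2, kv.1)) := hperm.mem_iff.2 hkv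
    obtain ⟨x, hx, rfl⟩ := List.mem_map.1 this
    exact PySem.Dict.get?_of_mem_items (d := d1) hx h1

-- ===== VERDICT (by name: the statement is the Claim_ definition above) =====
theorem are_inverse_spec : Claim_equal_are_inverse := by
  intro M1 M2 _
  unfold Spec_are_inverse are_inverse are_inverse_alt
  by_cases hsz : (PySem.Dict.ofList M1).size = (PySem.Dict.ofList M2).size
  · have hcore := core_eq (PySem.Dict.ofList M1) (PySem.Dict.ofList M2)
      (PySem.Dict.nodup_keys_ofList M1) hsz
    by_cases hA : ((PySem.Dict.ofList M1).items.all
        (fun kv => (PySem.Dict.ofList M2).get? kv.2 == some kv.1)) = true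
    · by_cases hB : ((PySem.Dict.ofList M2).items.all
          (fun kv => (PySem.Dict.ofList M1).get? kv.2 == some kv.1)) = true
      · simp only [hsz, ← hcore, hA, hB]; simp
      · simp only [hsz, ← hcore, hA]; simp [hB]
    · simp only [hsz, ← hcore]; simp [hA]
  · simp [hsz]
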